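-- pv_equiv track=rewrite | github.com/AthiraNatrajan/scripts | dockerFileUpgrade.py | get_best_confidence_classification
-- ===== SOURCE A (Python) =====
-- def get_best_confidence_classification(classifications):
--     # Define a mapping of classification to its ranking value
--     classification_ranking = {
--         "High": 3,
--         "Medium": 2,
--         "Low": 1
--     }
--
--     best_classification_value = 0
--     best_classification = None
--
--     # Loop through the classifications
--     for classification in classifications:
--         current_classification_value = classification_ranking.get(classification, 0)
--
--         # Check if this classification is better than the best found so far
--         if current_classification_value > best_classification_value:
--             best_classification_value = current_classification_value
--             best_classification = classification
--
--     return best_classification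
-- ===== SOURCE B (Python) =====
-- def get_best_confidence_classification(classifications):
--     for level in ("High", "Medium", "Low"):
--         if level in classifications:
--             return level
--     return None
-- ===== Notes on version B (the rewrite author's own statement) =====
-- stated objective: simpler
-- what changed: Instead of a max-scan over the list tracking the running best rank, B iterates the three priority levels in descending order and returns the first one present in the list (None if none are).
import Mathlib
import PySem

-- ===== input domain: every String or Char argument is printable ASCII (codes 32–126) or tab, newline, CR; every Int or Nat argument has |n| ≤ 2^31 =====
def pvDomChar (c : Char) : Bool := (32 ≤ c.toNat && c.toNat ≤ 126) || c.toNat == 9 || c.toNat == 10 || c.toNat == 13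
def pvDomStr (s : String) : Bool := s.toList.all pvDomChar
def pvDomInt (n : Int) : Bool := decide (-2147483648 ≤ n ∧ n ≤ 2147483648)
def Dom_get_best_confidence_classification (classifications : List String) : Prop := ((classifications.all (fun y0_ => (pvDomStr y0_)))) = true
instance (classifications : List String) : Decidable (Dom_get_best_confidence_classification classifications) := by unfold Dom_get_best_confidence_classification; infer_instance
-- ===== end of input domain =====

-- B replaces A's running-best scan over the list by a descending loop over the three priority
-- levels with a membership test each (objective: simpler).

-- ===== PORT A =====
-- the classification → rank dict defined at the top of A's body
def pvRankingA : PySem.Dict String Int :=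
  PySem.Dict.ofList [("High", 3), ("Medium", 2), ("Low", 1)]

-- one iteration of A's loop: state = (best_classification_value, best_classification)
def pvStepA (st : Int × Option String) (classification : String) : Int × Option String :=
  let current := pvRankingA.getD classification 0
  if current > st.1 then (current, some classification) else st

def get_best_confidence_classification (classifications : List String) : Option String :=
  (classifications.foldl pvStepA (0, none)).2

-- ===== PORT B =====
def get_best_confidence_classification_alt (classifications : List String) : Option String :=
  ["High", "Medium", "Low"].find? (fun level => classifications.contains level)

-- ===== PRECONDITION & SPEC =====
def Spec_get_best_confidence_classification (classifications : List String) (out : Option String) : Prop := out = get_best_confidence_classification_alt classifications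
instance (classifications : List String) (out : Option String) : Decidable (Spec_get_best_confidence_classification classifications out) := by unfold Spec_get_best_confidence_classification; infer_instance

-- ===== CLAIM (what is proved, stated in full; the proofs are below) =====
def Claim_equal_get_best_confidence_classification : Prop := ∀ (classifications : List String), Dom_get_best_confidence_classification classifications → Spec_get_best_confidence_classification classifications (get_best_confidence_classification classifications)

-- ===== LEMMAS AND PROOFS =====

-- A's dict lookup, as a case split on the string
theorem pvRank_eq (x : String) :
    pvRankingA.getD x 0 =
      (if x = "High" then 3 else if x = "Medium" then 2 else if x = "Low" then 1 else 0) := by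
  by_cases h1 : x = "High" <;> by_cases h2 : x = "Medium" <;> by_cases h3 : x = "Low" <;>
    simp_all [pvRankingA, PySem.Dict.ofList, PySem.Dict.update, PySem.Dict.getD_insert,
      PySem.Dict.getD_empty]

theorem pvRank_le (x : String) : pvRankingA.getD x 0 ≤ 3 := by
  rw [pvRank_eq]; split_ifs <;> norm_num

-- once the state is (3, some "High") the loop never changes it
theorem pvFold_high (xs : List String) :
    xs.foldl pvStepA (3, some "High") = (3, some "High") := by
  induction xs with
  | nil => rfl
  | cons x xs ih =>
      have hx := pvRank_le x
      simp only [List.foldl_cons, pvStepA]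
      rw [if_neg (by omega)]
      exact ih

-- from state (2, some "Medium") only "High" can improve
theorem pvFold_medium (xs : List String) :
    xs.foldl pvStepA (2, some "Medium") =
      (if "High" ∈ xs then (3, some "High") else (2, some "Medium")) := by
  induction xs with
  | nil => simp
  | cons x xs ih =>
      simp only [List.foldl_cons, pvStepA, pvRank_eq x]
      by_cases h1 : x = "High"
      · subst h1; simp [pvFold_high]
      · rw [if_neg (by split_ifs <;> omega)]
        simp [ih, Ne.symm h1]

-- from state (1, some "Low") only "High" or "Medium" can improve
theorem pvFold_low (xs : List String) :
    xs.foldl pvStepA (1, some "Low") =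
      (if "High" ∈ xs then (3, some "High")
       else if "Medium" ∈ xs then (2, some "Medium")
       else (1, some "Low")) := by
  induction xs with
  | nil => simp
  | cons x xs ih =>
      simp only [List.foldl_cons, pvStepA, pvRank_eq x]
      by_cases h1 : x = "High"
      · subst h1; simp [pvFold_high]
      · by_cases h2 : x = "Medium"
        · subst h2; simp [pvFold_medium, h1]
        · rw [if_neg (by split_ifs <;> omega)]
          simp [ih, Ne.symm h1, Ne.symm h2]

-- full characterisation of A's loop from its start state
theorem pvFold_start (xs : List String) :
    xs.foldl pvStepA (0, none) =
      (if "High" ∈ xs then (3, some "High")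
       else if "Medium" ∈ xs then (2, some "Medium")
       else if "Low" ∈ xs then (1, some "Low")
       else (0, none)) := by
  induction xs with
  | nil => simp
  | cons x xs ih =>
      simp only [List.foldl_cons, pvStepA, pvRank_eq x]
      by_cases h1 : x = "High"
      · subst h1; simp [pvFold_high]
      · by_cases h2 : x = "Medium"
        · subst h2; simp [pvFold_medium, h1]
        · by_cases h3 : x = "Low"
          · subst h3; simp [pvFold_low, h1, h2]
          · rw [if_neg (by split_ifs <;> omega)]
            simp [ih, Ne.symm h1, Ne.symm h2, Ne.symm h3]

-- ===== VERDICT (by name: the statement is the Claim_ definition above) =====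
theorem get_best_confidence_classification_spec : Claim_equal_get_best_confidence_classification := by
  intro classifications _
  unfold Spec_get_best_confidence_classification
  unfold get_best_confidence_classification get_best_confidence_classification_alt
  rw [pvFold_start]
  simp only [List.find?, List.contains_eq_mem]
  split_ifs <;> simp_all
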